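-- pv_equiv track=rewrite | github.com/ArturSavchuk/decision_support | Lab2/optimization of binary relations .py | get_s_seq
-- ===== SOURCE A (Python) =====
-- def get_blockers_by_R_strict(relation):
--     blockers = []
--     for j in range(0, len(relation)):
--         is_blocker = True
--         for i in range(0, len(relation)):
--             if relation[i][j] != 0 and j != i:
--                 is_blocker = False
--                 break
--         if is_blocker:
--             blockers.append(j)
--
--     return blockers
--
-- def getSnext(relation, blockers):
-- 	s1 = []
-- 	for j in range(0, len(relation)):
-- 		valid = True
-- 		for i in range(0, len(relation)):
-- 			if relation[i][j] == 1 and i not in blockers: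
-- 				valid = False
-- 				break
-- 			if j in blockers:
-- 				valid = False
-- 				break
-- 		if valid:
-- 			s1.append(j)
--
-- 	return s1
--
-- def add_to_arr(arr1, arr2):
-- 	for i in range(0, len(arr2)):
-- 		arr1.append(arr2[i])
--
-- def get_s_seq(relation):
-- 	omega = get_blockers_by_R_strict(relation)
-- 	a = get_blockers_by_R_strict(relation)
-- 	om = []
-- 	om.append(a)
-- 	t = []
-- 	while len(omega) != len(relation):
-- 			t = getSnext(relation, omega)
-- 			add_to_arr(omega, t)
-- 			om.append(t)
--
-- 	return om
-- ===== SOURCE B (Python) =====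
-- def get_s_seq(relation):
--     n = len(relation)
--     cnt = [sum(1 for i in range(n) if relation[i][j] == 1) for j in range(n)]
--     frontier = [j for j in range(n)
--                 if all(i == j or relation[i][j] == 0 for i in range(n))]
--     placed = [False] * n
--     for j in frontier:
--         placed[j] = True
--     total = len(frontier)
--     om = [frontier]
--     while total != n:
--         cnt = [cnt[j] - sum(1 for i in frontier if relation[i][j] == 1)
--                for j in range(n)]
--         frontier = [j for j in range(n) if not placed[j] and cnt[j] == 0]
--         for j in frontier:
--             placed[j] = True
--         total += len(frontier)
--         om.append(frontier)
--     return om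
-- ===== Notes on version B (the rewrite author's own statement) =====
-- stated objective: alternative
-- what changed: B replaces A's per-round rescans of every column (each node re-tests all n predecessors every round) by Kahn-style layering with per-node unplaced-1-predecessor counters computed once and decremented only for the nodes placed in the previous round; intended as asymptotically faster (O(n^2) vs O(n^3) rounds-times-scan) but a timing run did not confirm a measurable speed-up, so no speed is claimed.
import Mathlib
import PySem

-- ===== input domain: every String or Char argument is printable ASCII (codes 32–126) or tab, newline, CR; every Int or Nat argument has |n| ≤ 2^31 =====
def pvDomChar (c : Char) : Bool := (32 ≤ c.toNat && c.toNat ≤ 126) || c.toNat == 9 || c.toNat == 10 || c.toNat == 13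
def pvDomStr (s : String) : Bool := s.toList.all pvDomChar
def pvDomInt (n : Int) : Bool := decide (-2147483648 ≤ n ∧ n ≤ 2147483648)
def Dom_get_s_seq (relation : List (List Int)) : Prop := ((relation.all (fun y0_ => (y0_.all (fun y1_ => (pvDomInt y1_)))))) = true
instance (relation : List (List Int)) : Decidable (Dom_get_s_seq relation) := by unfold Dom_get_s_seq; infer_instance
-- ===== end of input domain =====

-- B replaces A's per-round full column rescans by Kahn-style layering with per-node
-- unplaced-1-predecessor counters decremented once per placed node (alternative algorithm).
-- relation[i][j]: always in range under Pre_ (total getD access; outside Pre_ A raises or diverges)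
def pvAt (relation : List (List Int)) (i j : Nat) : Int :=
  (relation.getD i []).getD j 0

-- ===== PORT A =====
def pyBlockers (relation : List (List Int)) : List Nat :=
  (List.range relation.length).foldl
    (fun bl j =>
      if (List.range relation.length).all (fun i => !((pvAt relation i j != 0) && (j != i)))
      then bl ++ [j] else bl)
    []

def pySnext (relation : List (List Int)) (blockers : List Nat) : List Nat :=
  (List.range relation.length).foldl
    (fun s j =>
      if (List.range relation.length).all
          (fun i => !((pvAt relation i j == 1) && !(blockers.contains i)) && !(blockers.contains j))
      then s ++ [j] else s)
    []

-- A's while-loop; fuel n+1 suffices under Pre_ (each round before saturation places ≥ 1 node)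
def pyLoopA (relation : List (List Int)) : Nat → List Nat → List (List Nat) → List (List Nat)
  | 0, _, om => om
  | fuel+1, omega, om =>
    if omega.length = relation.length then om
    else
      let t := pySnext relation omega
      pyLoopA relation fuel (omega ++ t) (om ++ [t])

def get_s_seq (relation : List (List Int)) : List (List Int) :=
  let omega := pyBlockers relation
  let a := pyBlockers relation
  (pyLoopA relation (relation.length + 1) omega [a]).map (fun l => l.map (fun j => (j : Int)))

-- ===== PORT B =====
-- B's while-loop; state: placed flags, counters of unplaced 1-predecessors, last frontier, total placed
def altLoopB (relation : List (List Int)) :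
    Nat → List Bool → List Int → List Nat → Nat → List (List Nat) → List (List Nat)
  | 0, _, _, _, _, om => om
  | fuel+1, placed, cnt, frontier, total, om =>
    if total = relation.length then om
    else
      let n := relation.length
      let cnt' := (List.range n).map
        (fun j => cnt.getD j 0 - ((frontier.countP (fun i => pvAt relation i j == 1) : Int)))
      let fr' := (List.range n).filter (fun j => !(placed.getD j false) && (cnt'.getD j 0 == 0))
      let placed' := fr'.foldl (fun p j => p.set j true) placed
      altLoopB relation fuel placed' cnt' fr' (total + fr'.length) (om ++ [fr'])

def get_s_seq_alt (relation : List (List Int)) : List (List Int) :=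
  let n := relation.length
  let cnt0 := (List.range n).map (fun j => ((List.range n).countP (fun i => pvAt relation i j == 1) : Int))
  let first := (List.range n).filter
    (fun j => (List.range n).all (fun i => (i == j) || (pvAt relation i j == 0)))
  let placed0 := first.foldl (fun p j => p.set j true) ((List.range n).map (fun _ => false))
  (altLoopB relation (n + 1) placed0 cnt0 first first.length [first]).map
    (fun l => l.map (fun j => (j : Int)))

-- ===== PRECONDITION & SPEC =====
-- one round of A's placement closure (used only to state termination of A's while-loop)
def pvStep (relation : List (List Int)) (S : List Nat) : List Nat :=
  S ++ (List.range relation.length).filter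
    (fun j => !(S.contains j) &&
      (List.range relation.length).all (fun i => !(pvAt relation i j == 1) || S.contains i))

def pvStart (relation : List (List Int)) : List Nat :=
  (List.range relation.length).filter
    (fun j => (List.range relation.length).all (fun i => (i == j) || (pvAt relation i j == 0)))

-- Pre_ excludes exactly the inputs where Python A does not return: ragged matrices (a row shorter
-- than the number of rows ⇒ IndexError) and matrices whose placement closure never saturates
-- (A's while-loop diverges). The port-level equality below happens to hold on all inputs (the
-- fuelled ports stay in lock-step even where the Pythons diverge), so the proof does not need
-- Pre_; Pre_ delimits where the claim speaks about Python A at all.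
def Pre_get_s_seq (relation : List (List Int)) : Prop :=
  (∀ row ∈ relation, relation.length ≤ row.length) ∧
  ((pvStep relation)^[relation.length] (pvStart relation)).length = relation.length

instance (relation : List (List Int)) : Decidable (Pre_get_s_seq relation) := by
  unfold Pre_get_s_seq; infer_instance

def pvWitness_get_s_seq : List (List Int) := [[0, 1], [0, 0]]

def Spec_get_s_seq (relation : List (List Int)) (out : List (List Int)) : Prop := out = get_s_seq_alt relation
instance (relation : List (List Int)) (out : List (List Int)) : Decidable (Spec_get_s_seq relation out) := by unfold Spec_get_s_seq; infer_instance

-- ===== CLAIM (what is proved, stated in full; the proofs are below) =====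
def Claim_equal_get_s_seq : Prop := ∀ (relation : List (List Int)), Dom_get_s_seq relation → Pre_get_s_seq relation → Spec_get_s_seq relation (get_s_seq relation)

-- ===== LEMMAS AND PROOFS =====

-- Python's `not (a != 0 and j != i)` equals B's `i == j or a == 0`
lemma pvBlockerPred (a : Int) (i j : Nat) :
    (!((a != 0) && (j != i))) = ((i == j) || (a == 0)) := by
  simp only [bne, Bool.not_and, Bool.not_not, Bool.beq_comm (a := j) (b := i)]
  exact Bool.or_comm _ _

lemma pvBlockers_eq_filter (rel : List (List Int)) :
    pyBlockers rel = (List.range rel.length).filter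
      (fun j => (List.range rel.length).all (fun i => (i == j) || (pvAt rel i j == 0))) := by
  unfold pyBlockers
  rw [PySem.List.foldl_append_if_eq_filter]
  simp only [List.nil_append]
  exact List.filter_congr (fun j _ => by simp only [pvBlockerPred])

lemma pvSnext_eq_filter (rel : List (List Int)) (bl : List Nat) :
    pySnext rel bl = (List.range rel.length).filter
      (fun j => (List.range rel.length).all
        (fun i => !((pvAt rel i j == 1) && !(bl.contains i)) && !(bl.contains j))) := by
  unfold pySnext
  rw [PySem.List.foldl_append_if_eq_filter]
  simp

lemma pvCountPSplit (l : List Nat) (p q : Nat → Bool) :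
    l.countP p = l.countP (fun i => p i && q i) + l.countP (fun i => p i && !q i) := by
  induction l with
  | nil => simp
  | cons a l ih =>
    simp only [List.countP_cons, ih]
    cases p a <;> cases q a <;> simp <;> omega

lemma pvFoldlSet_length (l : List Nat) (p : List Bool) :
    (l.foldl (fun a j => a.set j true) p).length = p.length := by
  induction l generalizing p with
  | nil => rfl
  | cons a l ih => simp [ih]

lemma pvSetGetD (p : List Bool) (x j : Nat) (hx : x < p.length) :
    (p.set x true).getD j false = ((x == j) || p.getD j false) := by
  simp only [List.getD, List.getElem?_set]
  by_cases h : x = j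
  · subst h; simp [hx]
  · simp [h]

lemma pvFoldlSet_getD (l : List Nat) (p : List Bool) (j : Nat) (h : ∀ x ∈ l, x < p.length) :
    (l.foldl (fun a j => a.set j true) p).getD j false = (p.getD j false || l.contains j) := by
  induction l generalizing p with
  | nil => simp
  | cons a l ih =>
    simp only [List.foldl_cons]
    rw [ih _ (fun x hx => by rw [List.length_set]; exact h x (List.mem_cons_of_mem _ hx))]
    rw [pvSetGetD _ _ _ (h a (List.mem_cons_self ..))]
    cases hp : p.getD j false <;> cases ha : a == j <;>
      simp_all [Bool.beq_comm]

-- the Kahn decrement: subtracting the last frontier's 1-edges updates the counter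
-- from "1-predecessors outside prev" to "1-predecessors outside prev ++ frontier"
lemma pvCntSub (rel : List (List Int)) (j : Nat) (prev frontier : List Nat)
    (hnd : (prev ++ frontier).Nodup) (hlt : ∀ x ∈ prev ++ frontier, x < rel.length) :
    (((List.range rel.length).countP
        (fun i => (pvAt rel i j == 1) && !(prev.contains i)) : Int))
      - ((frontier.countP (fun i => pvAt rel i j == 1) : Int))
    = (((List.range rel.length).countP
        (fun i => (pvAt rel i j == 1) && !((prev ++ frontier).contains i)) : Int)) := by
  have hnd' := List.nodup_append.mp hnd
  have hfr : frontier.Nodup := hnd'.2.1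
  have hdisj : ∀ x ∈ frontier, x ∉ prev := by
    intro x hx hxp
    exact hnd'.2.2 x hxp x hx rfl
  have hperm : frontier.Perm ((List.range rel.length).filter (fun i => frontier.contains i)) := by
    refine (List.perm_ext_iff_of_nodup hfr ((List.nodup_range).filter _)).mpr ?_
    intro x
    simp only [List.mem_filter, List.mem_range, List.contains_iff_mem]
    exact ⟨fun hx => ⟨hlt x (List.mem_append_right _ hx), hx⟩, fun hx => hx.2⟩
  have step1 : frontier.countP (fun i => pvAt rel i j == 1)
      = (List.range rel.length).countP
          (fun i => ((pvAt rel i j == 1) && !(prev.contains i)) && frontier.contains i) := by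
    rw [hperm.countP_eq, List.countP_filter]
    refine List.countP_congr ?_
    intro i _
    cases hf : frontier.contains i
    · simp
    · have : i ∉ prev := hdisj i (List.contains_iff_mem.mp hf)
      simp [this]
  have split := pvCountPSplit (List.range rel.length)
      (fun i => (pvAt rel i j == 1) && !(prev.contains i)) (fun i => frontier.contains i)
  have step3 : (List.range rel.length).countP
      (fun i => ((pvAt rel i j == 1) && !(prev.contains i)) && !(frontier.contains i))
    = (List.range rel.length).countP
        (fun i => (pvAt rel i j == 1) && !((prev ++ frontier).contains i)) := by
    refine List.countP_congr ?_
    intro i _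
    simp [Bool.and_assoc]
  rw [step1]
  rw [split]
  push_cast
  rw [step3]
  ring

-- A's validity test for column j equals B's "unplaced and counter zero" test
lemma pvPredEq (rel : List (List Int)) (omega : List Nat) (j : Nat) (hj : j < rel.length) :
    ((List.range rel.length).all
        (fun i => !((pvAt rel i j == 1) && !(omega.contains i)) && !(omega.contains j)))
    = (!(omega.contains j) &&
        ((((List.range rel.length).countP
            (fun i => (pvAt rel i j == 1) && !(omega.contains i)) : Int)) == 0)) := by
  have h0 : 0 ∈ List.range rel.length := by
    simp only [List.mem_range]; omega
  rw [Bool.eq_iff_iff]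
  simp only [List.all_eq_true, Bool.and_eq_true, Bool.not_eq_true', beq_iff_eq,
    Int.natCast_eq_zero, List.countP_eq_zero, Bool.and_eq_false_iff]
  constructor
  · intro H
    refine ⟨(H 0 h0).2, ?_⟩
    intro i hi hpc
    rcases (H i hi).1 with h1 | h1
    · rw [hpc.1] at h1; simp at h1
    · rw [hpc.2] at h1; simp at h1
  · intro hh i hi
    refine ⟨?_, hh.1⟩
    by_cases hp : pvAt rel i j = 1
    · cases hc : omega.contains i with
      | false => exact absurd ⟨hp, hc⟩ (hh.2 i hi)
      | true => exact Or.inr (by simp)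
    · exact Or.inl (by simp [hp])

lemma pvCntStep (rel : List (List Int)) (prev frontier : List Nat) (cnt : List Int)
    (hnd : (prev ++ frontier).Nodup) (hlt : ∀ x ∈ prev ++ frontier, x < rel.length)
    (hcnt : ∀ j, j < rel.length →
        cnt.getD j 0 = (((List.range rel.length).countP
          (fun i => (pvAt rel i j == 1) && !(prev.contains i)) : Int))) :
    ∀ j, j < rel.length →
      ((List.range rel.length).map
        (fun j => cnt.getD j 0 - ((frontier.countP (fun i => pvAt rel i j == 1) : Int)))).getD j 0
      = (((List.range rel.length).countP
          (fun i => (pvAt rel i j == 1) && !((prev ++ frontier).contains i)) : Int)) := by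
  intro j hj
  rw [PySem.List.getD_map_range _ _ _ _ hj, hcnt j hj]
  exact pvCntSub rel j prev frontier hnd hlt

lemma pvLoopEq (rel : List (List Int)) :
    ∀ (fuel : Nat) (prev frontier : List Nat) (placed : List Bool) (cnt : List Int)
      (om : List (List Nat)),
    (prev ++ frontier).Nodup →
    (∀ x ∈ prev ++ frontier, x < rel.length) →
    placed.length = rel.length →
    (∀ j, placed.getD j false = (prev ++ frontier).contains j) →
    (∀ j, j < rel.length →
        cnt.getD j 0 = (((List.range rel.length).countP
          (fun i => (pvAt rel i j == 1) && !(prev.contains i)) : Int))) →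
    pyLoopA rel fuel (prev ++ frontier) om
      = altLoopB rel fuel placed cnt frontier (prev ++ frontier).length om := by
  intro fuel
  induction fuel with
  | zero => intro prev frontier placed cnt om _ _ _ _ _; rfl
  | succ fuel ih =>
    intro prev frontier placed cnt om hnd hlt hplen hpl hcnt
    simp only [pyLoopA, altLoopB]
    by_cases hstop : (prev ++ frontier).length = rel.length
    · simp [hstop]
    · simp only [hstop, if_false]
      have hc' := pvCntStep rel prev frontier cnt hnd hlt hcnt
      -- A's new layer equals B's new frontier
      have ht : pySnext rel (prev ++ frontier)
          = (List.range rel.length).filter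
              (fun j => !(placed.getD j false) &&
                (((List.range rel.length).map
                  (fun j => cnt.getD j 0 -
                    ((frontier.countP (fun i => pvAt rel i j == 1) : Int)))).getD j 0 == 0)) := by
        rw [pvSnext_eq_filter]
        refine List.filter_congr ?_
        intro j hj
        simp only [List.mem_range] at hj
        rw [hpl j, hc' j hj]
        exact pvPredEq rel (prev ++ frontier) j hj
      rw [ht]
      -- invariants for the next round
      set T := (List.range rel.length).filter
              (fun j => !(placed.getD j false) &&
                (((List.range rel.length).map
                  (fun j => cnt.getD j 0 -
                    ((frontier.countP (fun i => pvAt rel i j == 1) : Int)))).getD j 0 == 0)) with hT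
      have hTcf : ∀ x ∈ T, (prev ++ frontier).contains x = false := by
        intro x hx
        rw [hT] at hx
        have h1 := ((Bool.and_eq_true _ _).mp ((List.mem_filter.mp hx).2)).1
        rw [hpl x] at h1
        simpa using h1
      have hTnotin : ∀ x ∈ T, x ∉ prev ++ frontier := by
        intro x hx hmem
        have hfalse := hTcf x hx
        simp at hfalse
        rcases List.mem_append.mp hmem with h | h
        · exact hfalse.1 h
        · exact hfalse.2 h
      have hTlt : ∀ x ∈ T, x < rel.length := by
        intro x hx
        rw [hT] at hx
        have := List.mem_of_mem_filter hx
        simpa using this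
      have hnd2 : ((prev ++ frontier) ++ T).Nodup := by
        rw [List.nodup_append]
        exact ⟨hnd, (List.nodup_range).filter _,
          fun a ha b hb heq => hTnotin b hb (heq ▸ ha)⟩
      have hlt2 : ∀ x ∈ (prev ++ frontier) ++ T, x < rel.length := by
        intro x hx
        rcases List.mem_append.mp hx with h | h
        · exact hlt x h
        · exact hTlt x h
      have hplen2 : (T.foldl (fun p j => p.set j true) placed).length = rel.length := by
        rw [pvFoldlSet_length]; exact hplen
      have hpl2 : ∀ j, (T.foldl (fun p j => p.set j true) placed).getD j false
          = ((prev ++ frontier) ++ T).contains j := by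
        intro j
        rw [pvFoldlSet_getD _ _ _ (fun x hx => by rw [hplen]; exact hTlt x hx)]
        rw [hpl j]
        simp [Bool.or_assoc]
      have := ih (prev ++ frontier) T
        (T.foldl (fun p j => p.set j true) placed)
        ((List.range rel.length).map
          (fun j => cnt.getD j 0 - ((frontier.countP (fun i => pvAt rel i j == 1) : Int))))
        (om ++ [T]) hnd2 hlt2 hplen2 hpl2 hc'
      rw [this, List.length_append]

lemma pvCoreEq (rel : List (List Int)) :
    pyLoopA rel (rel.length + 1) (pyBlockers rel) [pyBlockers rel]
      = altLoopB rel (rel.length + 1)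
          (((List.range rel.length).filter
            (fun j => (List.range rel.length).all (fun i => (i == j) || (pvAt rel i j == 0)))).foldl
              (fun p j => p.set j true) ((List.range rel.length).map (fun _ => false)))
          ((List.range rel.length).map
            (fun j => (((List.range rel.length).countP (fun i => pvAt rel i j == 1) : Int))))
          ((List.range rel.length).filter
            (fun j => (List.range rel.length).all (fun i => (i == j) || (pvAt rel i j == 0))))
          ((List.range rel.length).filter
            (fun j => (List.range rel.length).all (fun i => (i == j) || (pvAt rel i j == 0)))).length
          [(List.range rel.length).filter
            (fun j => (List.range rel.length).all (fun i => (i == j) || (pvAt rel i j == 0)))] := by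
  set F := (List.range rel.length).filter
      (fun j => (List.range rel.length).all (fun i => (i == j) || (pvAt rel i j == 0))) with hF
  have hFlt : ∀ x ∈ F, x < rel.length := by
    intro x hx
    have := List.mem_of_mem_filter hx
    simpa using this
  have hbase : ∀ j, (((List.range rel.length).map (fun _ => false)) : List Bool).getD j false = false := by
    intro j
    by_cases hj : j < rel.length
    · exact PySem.List.getD_map_range _ _ _ _ hj
    · exact List.getD_eq_default _ _ (by simp; omega)
  have h4 : ∀ j, (F.foldl (fun p j => p.set j true)
        ((List.range rel.length).map (fun _ => false))).getD j false = ([] ++ F).contains j := by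
    intro j
    rw [pvFoldlSet_getD _ _ _ (fun x hx => by simp only [List.length_map, List.length_range]; exact hFlt x hx)]
    rw [hbase j]
    simp
  have h5 : ∀ j, j < rel.length →
      ((List.range rel.length).map
        (fun j => (((List.range rel.length).countP (fun i => pvAt rel i j == 1) : Int)))).getD j 0
      = (((List.range rel.length).countP
          (fun i => (pvAt rel i j == 1) && !((([] : List Nat)).contains i)) : Int)) := by
    intro j hj
    rw [PySem.List.getD_map_range _ _ _ _ hj]
    congr 1
    refine List.countP_congr ?_
    intro i _
    simp
  have h := pvLoopEq rel (rel.length + 1) [] F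
      (F.foldl (fun p j => p.set j true) ((List.range rel.length).map (fun _ => false)))
      ((List.range rel.length).map
        (fun j => (((List.range rel.length).countP (fun i => pvAt rel i j == 1) : Int))))
      [F]
      (by simpa using (List.nodup_range).filter _)
      (by simpa using hFlt)
      (by rw [pvFoldlSet_length]; simp)
      h4 h5
  simp only [List.nil_append] at h
  rw [pvBlockers_eq_filter rel, ← hF]
  exact h

-- ===== VERDICT (by name: the statement is the Claim_ definition above) =====
theorem get_s_seq_spec : Claim_equal_get_s_seq := by
  intro rel _ _
  show get_s_seq rel = get_s_seq_alt rel
  exact congrArg (List.map (fun l => l.map (fun j => (j : Int)))) (pvCoreEq rel)
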